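-- pv_equiv track=rewrite | github.com/analuizafreitasbs/BancoDeDados_EspacoSorriso | remove_quotes.py | remove_quotes_from_strings
-- ===== SOURCE A (Python) =====
-- def remove_quotes_from_strings(content):
--     """Remove double quotes from string fields in .rel format"""
--     lines = content.splitlines()
--     result = []
--
--     for line in lines:
--         # Skip header lines and relation definitions
--         if '=' in line and '{' in line:
--             result.append(line)
--             continue
--         elif line.strip() in ['}', 'group: algebra', '']:
--             result.append(line)
--             continue
--         elif ':' in line and not line.startswith('\t'):  # header line
--             result.append(line)
--             continue
--
--         # Process data lines - remove quotes from string fields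
--         if line.startswith('\t'):
--             # Split by comma and remove quotes from each field
--             parts = []
--             in_quotes = False
--             current = ''
--
--             i = 0
--             while i < len(line):
--                 char = line[i]
--                 if char == '"':
--                     in_quotes = not in_quotes
--                     # Don't add the quote to current
--                 elif char == ',' and not in_quotes:
--                     parts.append(current.strip())
--                     current = ''
--                 else:
--                     current += char
--                 i += 1
--
--             if current:
--                 parts.append(current.strip())
--
--             # Rejoin with commas
--             result.append('\t' + ', '.join(parts))
--
--         else:
--             result.append(line)
--
--     return '\n'.join(result)
-- ===== SOURCE B (Python) =====
-- def _is_data(line):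
--     return (line.startswith('\t')
--             and not ('=' in line and '{' in line)
--             and line.strip() not in ('}', 'group: algebra', ''))
--
--
-- def _fields(line):
--     current, parts = '', []
--     for idx, chunk in enumerate(line.split('"')):
--         if idx % 2 == 0:
--             head, *rest = chunk.split(',')
--             current += head
--             for seg in rest:
--                 parts.append(current.strip())
--                 current = seg
--         else:
--             current += chunk
--     if current:
--         parts.append(current.strip())
--     return parts
--
--
-- def remove_quotes_from_strings(content):
--     """Remove double quotes from string fields in .rel format"""
--     return '\n'.join('\t' + ', '.join(_fields(line)) if _is_data(line) else line
--                      for line in content.splitlines())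
-- ===== Notes on version B (the rewrite author's own statement) =====
-- stated objective: idiomatic
-- what changed: A's four-branch guard chain plus a char-by-char while loop with a manual in_quotes flag is replaced by a single line classifier (_is_data) and, for data lines, a fold over the chunks obtained by splitting the line on the double-quote character (even chunks lie outside quotes and are split on commas, odd chunks lie inside), with stripping of fields as before.
import Mathlib
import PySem

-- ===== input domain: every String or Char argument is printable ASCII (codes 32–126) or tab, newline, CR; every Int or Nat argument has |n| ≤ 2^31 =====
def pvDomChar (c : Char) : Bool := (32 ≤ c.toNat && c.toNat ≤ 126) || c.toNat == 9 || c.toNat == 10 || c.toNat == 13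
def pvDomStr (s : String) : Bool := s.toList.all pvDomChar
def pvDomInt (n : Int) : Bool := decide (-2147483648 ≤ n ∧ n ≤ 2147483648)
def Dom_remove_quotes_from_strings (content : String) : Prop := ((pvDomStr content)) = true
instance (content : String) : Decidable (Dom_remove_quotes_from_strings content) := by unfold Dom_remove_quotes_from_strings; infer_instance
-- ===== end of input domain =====

-- B replaces A's char-by-char state machine (manual in_quotes flag and guard chain) by a
-- line classifier plus a fold over the '"'-split chunks of a data line (objective: idiomatic).

-- ===== PORT A =====
-- A's while-loop over the characters of a data line: state (in_quotes, current, parts),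
-- returned as (current, parts).
def pvALoop : List Char → Bool → List Char → List (List Char) → List Char × List (List Char)
  | [], _, cur, parts => (cur, parts)
  | c :: rest, inq, cur, parts =>
    if c = '"' then pvALoop rest (!inq) cur parts
    else if c = ',' ∧ inq = false then pvALoop rest inq [] (parts ++ [PySem.Chars.strip cur])
    else pvALoop rest inq (cur ++ [c]) parts

def pvAProcLine (line : String) : String :=
  if PySem.Str.isIn "=" line && PySem.Str.isIn "{" line then line
  else if PySem.Str.strip line ∈ ["}", "group: algebra", ""] then line
  else if PySem.Str.isIn ":" line && !(PySem.Str.startswith line "\t") then line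
  else if PySem.Str.startswith line "\t" then
    let st := pvALoop line.toList false [] []
    let parts := if st.1 ≠ [] then st.2 ++ [PySem.Chars.strip st.1] else st.2
    String.ofList ('\t' :: PySem.Chars.join [',', ' '] parts)
  else line

def remove_quotes_from_strings (content : String) : String :=
  PySem.Str.join "\n" ((PySem.Str.splitlines content).map pvAProcLine)

-- ===== PORT B =====
-- B's line classifier: a data line starts with a tab and matches none of the skip patterns.
def pvIsData (line : String) : Bool :=
  PySem.Str.startswith line "\t"
    && !(PySem.Str.isIn "=" line && PySem.Str.isIn "{" line)
    && !(PySem.Str.strip line ∈ ["}", "group: algebra", ""])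

-- One step of B's 'for idx, chunk in enumerate(line.split('"'))' fold; state (current, parts).
def pvChunkStep (st : List Char × List (List Char)) (ic : Int × List Char) : List Char × List (List Char) :=
  if ic.1 % 2 == 0 then
    let segs := PySem.Chars.splitOn ic.2 [',']
    segs.tail.foldl (fun s seg => (seg, s.2 ++ [PySem.Chars.strip s.1])) (st.1 ++ segs.headI, st.2)
  else (st.1 ++ ic.2, st.2)

def pvBFields (line : List Char) : List (List Char) :=
  let st := (PySem.List.enumerate (PySem.Chars.splitOn line ['"'])).foldl pvChunkStep ([], [])
  if st.1 ≠ [] then st.2 ++ [PySem.Chars.strip st.1] else st.2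

def remove_quotes_from_strings_alt (content : String) : String :=
  PySem.Str.join "\n" ((PySem.Str.splitlines content).map (fun line =>
    if pvIsData line then String.ofList ('\t' :: PySem.Chars.join [',', ' '] (pvBFields line.toList))
    else line))

-- ===== PRECONDITION & SPEC =====
def Spec_remove_quotes_from_strings (content : String) (out : String) : Prop := out = remove_quotes_from_strings_alt content
instance (content : String) (out : String) : Decidable (Spec_remove_quotes_from_strings content out) := by unfold Spec_remove_quotes_from_strings; infer_instance

-- ===== CLAIM (what is proved, stated in full; the proofs are below) =====
def Claim_equal_remove_quotes_from_strings : Prop := ∀ (content : String), Dom_remove_quotes_from_strings content → Spec_remove_quotes_from_strings content (remove_quotes_from_strings content)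

-- ===== LEMMAS AND PROOFS =====

-- A clean recursive characterisation of Python's split on a single-character separator.
def pvSp (d : Char) : List Char → List (List Char)
  | [] => [[]]
  | c :: cs => if c = d then [] :: pvSp d cs else (pvSp d cs).modifyHead (c :: ·)

theorem pvSp_cons_ex (d : Char) (l : List Char) : ∃ h t, pvSp d l = h :: t := by
  cases l with
  | nil => exact ⟨[], [], rfl⟩
  | cons c cs =>
    simp only [pvSp]
    split
    · exact ⟨_, _, rfl⟩
    · obtain ⟨h, t, hst⟩ := pvSp_cons_ex d cs
      exact ⟨_, _, by rw [hst]; rfl⟩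

theorem pvGo_eq_sp (d : Char) : ∀ (fuel : Nat) (l cur : List Char) (acc : List (List Char)),
    l.length ≤ fuel →
    PySem.Chars.splitOn.go [d] fuel l cur acc
      = acc.reverse ++ (pvSp d l).modifyHead (cur.reverse ++ ·) := by
  intro fuel
  induction fuel with
  | zero =>
    intro l cur acc hl
    have : l = [] := by cases l <;> simp_all
    subst this
    simp [PySem.Chars.splitOn.go, pvSp]
  | succ n ih =>
    intro l cur acc hl
    cases l with
    | nil => simp [PySem.Chars.splitOn.go, pvSp]
    | cons c rest =>
      simp only [PySem.Chars.splitOn.go]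
      by_cases hc : c = d
      · have hpre : [d].isPrefixOf (c :: rest) = true := by simp [List.isPrefixOf, hc]
        rw [if_pos hpre]
        rw [show List.drop [d].length (c :: rest) = rest from rfl]
        rw [ih rest [] (cur.reverse :: acc) (by simpa using hl)]
        obtain ⟨h, t, hst⟩ := pvSp_cons_ex d rest
        simp [pvSp, hst, hc]
      · have hpre : [d].isPrefixOf (c :: rest) = false := by
          simp [List.isPrefixOf]
          exact fun h => absurd h.symm hc
        rw [if_neg (by simp [hpre])]
        rw [ih rest (c :: cur) acc (by simpa using hl)]
        obtain ⟨h, t, hst⟩ := pvSp_cons_ex d rest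
        simp [pvSp, hst, hc]

theorem pvSplitOn_single (d : Char) (l : List Char) :
    PySem.Chars.splitOn l [d] = pvSp d l := by
  rw [show PySem.Chars.splitOn l [d] = PySem.Chars.splitOn.go [d] (l.length + 1) l [] [] from rfl]
  rw [pvGo_eq_sp d (l.length + 1) l [] [] (by omega)]
  obtain ⟨h, t, hst⟩ := pvSp_cons_ex d l
  simp [hst]

-- Proof-side rephrasing of B's enumerate fold as an index-carrying recursion.
def pvBGo : Nat → List (List Char) → List Char → List (List Char) → List Char × List (List Char)
  | _, [], cur, parts => (cur, parts)
  | idx, ch :: rest, cur, parts =>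
    if idx % 2 = 0 then
      let segs := PySem.Chars.splitOn ch [',']
      let st := segs.tail.foldl (fun s seg => (seg, s.2 ++ [PySem.Chars.strip s.1])) (cur ++ segs.headI, parts)
      pvBGo (idx + 1) rest st.1 st.2
    else pvBGo (idx + 1) rest (cur ++ ch) parts

theorem pvFoldEnum_eq_pvBGo : ∀ (chunks : List (List Char)) (n : Nat) (cur : List Char) (parts : List (List Char)),
    (PySem.List.enumerate chunks (n : Int)).foldl pvChunkStep (cur, parts) = pvBGo n chunks cur parts := by
  intro chunks
  induction chunks with
  | nil => intro n cur parts; simp [PySem.List.enumerate_nil, pvBGo]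
  | cons ch rest ih =>
    intro n cur parts
    rw [PySem.List.enumerate_cons]
    have hpar : ((n : Int) % 2 = 0) ↔ (n % 2 = 0) := by omega
    by_cases hn : n % 2 = 0
    · have h2 : ((n : Int) % 2 == 0) = true := by simpa using hpar.mpr hn
      simp only [List.foldl_cons, pvChunkStep, h2, pvBGo, if_pos hn]
      rw [show (n : Int) + 1 = ((n + 1 : Nat) : Int) by push_cast; ring]
      exact ih (n + 1) _ _
    · have h2 : ((n : Int) % 2 == 0) = false := by
        simp only [beq_eq_false_iff_ne, ne_eq]
        intro h; exact hn (hpar.mp (by simp [h]))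
      simp only [List.foldl_cons, pvChunkStep, h2, Bool.false_eq_true, if_false, pvBGo, if_neg hn]
      rw [show (n : Int) + 1 = ((n + 1 : Nat) : Int) by push_cast; ring]
      exact ih (n + 1) _ _

theorem pvParity_succ (idx : Nat) : ((idx + 1) % 2 == 1) = !(idx % 2 == 1) := by
  rcases Nat.mod_two_eq_zero_or_one idx with h | h <;> simp [Nat.add_mod, h]

-- The heart of the proof: B's chunk fold computes exactly A's character loop.
theorem pvBGo_eq_pvALoop : ∀ (l : List Char) (idx : Nat) (cur : List Char) (parts : List (List Char)),
    pvBGo idx (pvSp '"' l) cur parts = pvALoop l (idx % 2 == 1) cur parts := by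
  intro l
  induction l with
  | nil =>
    intro idx cur parts
    by_cases hp : idx % 2 = 0 <;>
      simp [pvSp, pvBGo, pvALoop, hp, pvSplitOn_single]
  | cons c rest ih =>
    intro idx cur parts
    by_cases hc : c = '"'
    · subst hc
      have hstep : pvBGo idx ([] :: pvSp '"' rest) cur parts
          = pvBGo (idx + 1) (pvSp '"' rest) cur parts := by
        by_cases hp : idx % 2 = 0 <;>
          simp [pvBGo, hp, pvSplitOn_single, pvSp]
      rw [show pvSp '"' ('"' :: rest) = [] :: pvSp '"' rest from by simp [pvSp]]
      rw [hstep, ih (idx + 1), pvParity_succ]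
      simp [pvALoop]
    · obtain ⟨h, t, hst⟩ := pvSp_cons_ex '"' rest
      simp only [pvSp, if_neg hc, hst, List.modifyHead]
      by_cases hp : idx % 2 = 0
      · have hq : (idx % 2 == 1) = false := by simp [hp]
        by_cases hcc : c = ','
        · subst hcc
          obtain ⟨s0, sr, hsc⟩ := pvSp_cons_ex ',' h
          have lhs : pvBGo idx ((',' :: h) :: t) cur parts
              = pvBGo (idx + 1) t (sr.foldl (fun s seg => (seg, s.2 ++ [PySem.Chars.strip s.1])) (s0, parts ++ [PySem.Chars.strip cur])).1
                  (sr.foldl (fun s seg => (seg, s.2 ++ [PySem.Chars.strip s.1])) (s0, parts ++ [PySem.Chars.strip cur])).2 := by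
            simp [pvBGo, hp, pvSplitOn_single, pvSp, hsc]
          have rhs : pvBGo idx (h :: t) [] (parts ++ [PySem.Chars.strip cur])
              = pvBGo (idx + 1) t (sr.foldl (fun s seg => (seg, s.2 ++ [PySem.Chars.strip s.1])) (s0, parts ++ [PySem.Chars.strip cur])).1
                  (sr.foldl (fun s seg => (seg, s.2 ++ [PySem.Chars.strip s.1])) (s0, parts ++ [PySem.Chars.strip cur])).2 := by
            simp [pvBGo, hp, pvSplitOn_single, hsc]
          rw [lhs, ← rhs, ← hst, ih idx, pvALoop]
          simp [hq]
        · obtain ⟨s0, sr, hsc⟩ := pvSp_cons_ex ',' h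
          have lhs : pvBGo idx ((c :: h) :: t) cur parts
              = pvBGo (idx + 1) t (sr.foldl (fun s seg => (seg, s.2 ++ [PySem.Chars.strip s.1])) ((cur ++ [c]) ++ s0, parts)).1
                  (sr.foldl (fun s seg => (seg, s.2 ++ [PySem.Chars.strip s.1])) ((cur ++ [c]) ++ s0, parts)).2 := by
            simp [pvBGo, hp, pvSplitOn_single, pvSp, hcc, hsc]
          have rhs : pvBGo idx (h :: t) (cur ++ [c]) parts
              = pvBGo (idx + 1) t (sr.foldl (fun s seg => (seg, s.2 ++ [PySem.Chars.strip s.1])) ((cur ++ [c]) ++ s0, parts)).1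
                  (sr.foldl (fun s seg => (seg, s.2 ++ [PySem.Chars.strip s.1])) ((cur ++ [c]) ++ s0, parts)).2 := by
            simp [pvBGo, hp, pvSplitOn_single, hsc]
          rw [lhs, ← rhs, ← hst, ih idx, pvALoop]
          simp [hq, hc, hcc]
      · have hq : (idx % 2 == 1) = true := by
          rcases Nat.mod_two_eq_zero_or_one idx with h' | h' <;> simp_all
        have lhs : pvBGo idx ((c :: h) :: t) cur parts
            = pvBGo (idx + 1) t ((cur ++ [c]) ++ h) parts := by
          simp [pvBGo, hp]
        have rhs : pvBGo idx (h :: t) (cur ++ [c]) parts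
            = pvBGo (idx + 1) t ((cur ++ [c]) ++ h) parts := by
          simp [pvBGo, hp]
        rw [lhs, ← rhs, ← hst, ih idx, pvALoop]
        simp [hq, hc]

theorem pvProcLine_eq (line : String) :
    pvAProcLine line
      = (if pvIsData line then String.ofList ('\t' :: PySem.Chars.join [',', ' '] (pvBFields line.toList))
         else line) := by
  have hfields : pvBFields line.toList
      = (let st := pvALoop line.toList false [] []
         if st.1 ≠ [] then st.2 ++ [PySem.Chars.strip st.1] else st.2) := by
    unfold pvBFields
    rw [show (0 : Int) = ((0 : Nat) : Int) from rfl, pvFoldEnum_eq_pvBGo,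
        pvSplitOn_single '"' line.toList, pvBGo_eq_pvALoop line.toList 0]
    rfl
  rw [hfields]
  unfold pvAProcLine pvIsData
  split_ifs <;> simp_all

-- ===== VERDICT (by name: the statement is the Claim_ definition above) =====
theorem remove_quotes_from_strings_spec : Claim_equal_remove_quotes_from_strings := by
  intro content _
  unfold Spec_remove_quotes_from_strings remove_quotes_from_strings remove_quotes_from_strings_alt
  have : pvAProcLine = fun line =>
      (if pvIsData line then String.ofList ('\t' :: PySem.Chars.join [',', ' '] (pvBFields line.toList))
       else line) := funext pvProcLine_eq
  rw [this]
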